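-- pv_equiv track=rewrite | github.com/marcinbelicki/projekt_io_nonogram | algorytm1i2.py | tonono
-- ===== SOURCE A (Python) =====
-- def tonono(wej): # funkcja konwertująca macierz bitów na format nonogramu
--     wyj=[]
--     for i in range(len(wej)):
--         rzad = []
--         licz = 0
--         for j in range(len(wej[0])):
--             if wej[i][j] == 1:
--                 licz = licz + 1
--             else:
--                 if licz != 0:
--                     rzad.append(licz)
--                 licz = 0
--         if licz != 0:
--             rzad.append(licz)
--         wyj.append(rzad)
--     return wyj # wynikiem jest tablica zawierająca dwie podtablice, gdzie w każdej zawarty jest wektor ciągów wartości "1" - w tablicy o indeksie 0 dla wierszy, w tablicy o indeksie 1 dla kolumn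
-- ===== SOURCE B (Python) =====
-- def tonono(wej):
--     wyj = []
--     for row in wej:
--         bits = ''.join('1' if row[j] == 1 else '0' for j in range(len(wej[0])))
--         wyj.append([len(p) for p in bits.split('0') if p])
--     return wyj
-- ===== Notes on version B (the rewrite author's own statement) =====
-- stated objective: alternative
-- what changed: Replaces A's stateful counter/flush scan with a change of representation: each row is rendered as a '1'/'0' string over range(len(wej[0])), split on '0', and the runs are the lengths of the nonempty pieces.
import Mathlib
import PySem

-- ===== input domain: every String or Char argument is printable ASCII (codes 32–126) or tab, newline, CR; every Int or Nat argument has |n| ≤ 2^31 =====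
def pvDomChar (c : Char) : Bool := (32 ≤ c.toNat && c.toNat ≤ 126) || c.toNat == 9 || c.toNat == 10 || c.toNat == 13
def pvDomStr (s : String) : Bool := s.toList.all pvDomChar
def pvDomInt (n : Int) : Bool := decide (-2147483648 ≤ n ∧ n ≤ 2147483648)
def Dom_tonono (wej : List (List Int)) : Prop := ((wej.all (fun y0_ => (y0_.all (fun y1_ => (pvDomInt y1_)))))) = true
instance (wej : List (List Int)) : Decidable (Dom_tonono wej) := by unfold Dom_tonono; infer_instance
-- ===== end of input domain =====

-- B replaces A's stateful counter/flush column loop with a change of representation: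
-- each row is rendered as a '1'/'0' string, split on '0', and the nonempty pieces'
-- lengths are the runs; same cost, genuinely different algorithm.

-- ===== PORT A =====
-- literal transliteration of A: outer loop over range(len(wej)), inner loop over
-- range(len(wej[0])) with state (rzad, licz); wej[i][j] is pyGetD (in range under Pre_).
def tonono (wej : List (List Int)) : List (List Int) :=
  (PySem.List.pyRange 0 (wej.length : Int) 1).foldl
    (fun wyj i =>
      let st :=
        (PySem.List.pyRange 0 (((PySem.List.pyGetD wej 0 []).length : Int)) 1).foldl
          (fun (st : List Int × Int) j =>
            if PySem.List.pyGetD (PySem.List.pyGetD wej i []) j 0 = 1 then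
              (st.1, st.2 + 1)
            else if st.2 ≠ 0 then (st.1 ++ [st.2], (0 : Int)) else (st.1, (0 : Int)))
          ([], 0)
      wyj ++ [if st.2 ≠ 0 then st.1 ++ [st.2] else st.1])
    []

-- ===== PORT B =====
-- port of Source B: for each row build the '1'/'0' character string over range(len(wej[0]))
-- (''.join of the generator = map), split it on '0' (PySem.Chars.splitOn = str.split with
-- a nonempty separator), keep the nonempty pieces and take their lengths.
def tonono_alt (wej : List (List Int)) : List (List Int) :=
  wej.foldl
    (fun wyj row =>
      let bits : List Char :=
        (PySem.List.pyRange 0 (((PySem.List.pyGetD wej 0 []).length : Int)) 1).map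
          (fun j => if PySem.List.pyGetD row j 0 = 1 then '1' else '0')
      wyj ++ [((PySem.Chars.splitOn bits ['0']).filter (fun p => p ≠ [])).map
                (fun p => (p.length : Int))])
    []

-- ===== PRECONDITION & SPEC =====
-- Pre_ excludes exactly the inputs where A raises IndexError: a row shorter than the first row.
def Pre_tonono (wej : List (List Int)) : Prop :=
  ∀ row ∈ wej, (wej.headD []).length ≤ row.length
instance (wej : List (List Int)) : Decidable (Pre_tonono wej) := by unfold Pre_tonono; infer_instance

def pvWitness_tonono : List (List Int) := [[1, 1, 0, 1], [0, 1, 1, 1]]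

def Spec_tonono (wej : List (List Int)) (out : List (List Int)) : Prop := out = tonono_alt wej
instance (wej : List (List Int)) (out : List (List Int)) : Decidable (Spec_tonono wej out) := by unfold Spec_tonono; infer_instance

-- ===== CLAIM (what is proved, stated in full; the proofs are below) =====
def Claim_equal_tonono : Prop := ∀ (wej : List (List Int)), Dom_tonono wej → Pre_tonono wej → Spec_tonono wej (tonono wej)

-- ===== LEMMAS AND PROOFS =====

-- proof-side helpers: A's inner-loop step and flush, and a structural run extractor.
def stepA (st : List Int × Int) (c : Int) : List Int × Int :=
  if c = 1 then (st.1, st.2 + 1)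
  else if st.2 ≠ 0 then (st.1 ++ [st.2], (0 : Int)) else (st.1, (0 : Int))

def finishA (st : List Int × Int) : List Int :=
  if st.2 ≠ 0 then st.1 ++ [st.2] else st.1

def runsR : List Int → List Int
  | [] => []
  | c :: rest =>
    if c = 1 then
      (((rest.takeWhile (· == 1)).length : Int) + 1)
        :: runsR (rest.drop (rest.takeWhile (· == 1)).length)
    else runsR rest
termination_by cells => cells.length
decreasing_by
  all_goals simp

lemma stepA_one (st : List Int × Int) : stepA st 1 = (st.1, st.2 + 1) := by
  simp [stepA]

lemma stepA_flush (c : Int) (st : List Int × Int) (hc : c ≠ 1) (hl : st.2 ≠ 0) :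
    stepA st c = (st.1 ++ [st.2], 0) := by
  simp [stepA, hc, hl]

lemma stepA_zero (c : Int) (st : List Int × Int) (hc : c ≠ 1) (hl : st.2 = 0) :
    stepA st c = (st.1, 0) := by
  simp [stepA, hc, hl]

-- accumulator lemma for A's inner loop
lemma foldl_stepA_acc (cells : List Int) :
    ∀ (acc : List Int) (l : Int),
      cells.foldl stepA (acc, l) =
        (acc ++ (cells.foldl stepA ([], l)).1, (cells.foldl stepA ([], l)).2) := by
  induction cells with
  | nil => intro acc l; simp
  | cons c rest ih =>
    intro acc l
    by_cases hc : c = 1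
    · subst hc
      simp only [List.foldl_cons, stepA_one]
      exact ih acc (l + 1)
    · by_cases hl : l = 0
      · subst hl
        simp only [List.foldl_cons, stepA_zero c (acc, 0) hc rfl, stepA_zero c (([]:List Int), 0) hc rfl]
        exact ih acc 0
      · simp only [List.foldl_cons, stepA_flush c (acc, l) hc hl, stepA_flush c (([]:List Int), l) hc hl, List.nil_append]
        rw [ih (acc ++ [l]) 0, ih [l] 0, List.append_assoc]

-- joint characterisation of A's inner loop by runsR
lemma stepA_runsR (cells : List Int) :
    (∀ k : Int, 0 < k →
        finishA (cells.foldl stepA ([], k)) =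
          (k + ((cells.takeWhile (· == 1)).length : Int))
            :: runsR (cells.drop (cells.takeWhile (· == 1)).length)) ∧
      finishA (cells.foldl stepA ([], 0)) = runsR cells := by
  induction cells with
  | nil =>
    constructor
    · intro k hk
      simp [finishA, runsR]
      omega
    · simp [finishA, runsR]
  | cons c rest ih =>
    obtain ⟨ih1, ih2⟩ := ih
    constructor
    · intro k hk
      by_cases hc : c = 1
      · subst hc
        simp only [List.foldl_cons, stepA_one]
        rw [ih1 (k + 1) (by omega)]
        simp only [List.takeWhile_cons, beq_self_eq_true, if_true, List.length_cons,
          List.drop_succ_cons]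
        congr 1
        push_cast; ring
      · simp only [List.foldl_cons, stepA_flush c (([]:List Int), k) hc (by show k ≠ 0; omega), List.nil_append]
        rw [foldl_stepA_acc rest [k] 0]
        have hfin : finishA ([k] ++ (rest.foldl stepA ([], 0)).1,
            (rest.foldl stepA ([], 0)).2) = [k] ++ finishA (rest.foldl stepA ([], 0)) := by
          unfold finishA
          split_ifs <;> simp
        rw [hfin, ih2]
        have htw : (c :: rest).takeWhile (· == (1:Int)) = [] := by
          simp [hc]
        rw [htw]
        simp [runsR, hc]
    · by_cases hc : c = 1
      · subst hc
        simp only [List.foldl_cons, stepA_one]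
        rw [show ((([]:List Int), (0:Int)).1, (([]:List Int), (0:Int)).2 + 1) = (([]:List Int), (1:Int)) by norm_num,
          ih1 1 (by omega), runsR, if_pos rfl]
        congr 1
        ring
      · simp only [List.foldl_cons, stepA_zero c (([]:List Int), 0) hc rfl]
        rw [ih2, runsR, if_neg hc]

-- bridge: A's inner loop over range(n) with indexed access = fold over the first n cells
lemma foldl_range_take {α β : Type} (xs : List α) (d : α) (g : β → α → β) :
    ∀ (n : Nat), n ≤ xs.length → ∀ (init : β),
      (PySem.List.pyRange 0 (n : Int) 1).foldl
          (fun st j => g st (PySem.List.pyGetD xs j d)) init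
        = (xs.take n).foldl g init := by
  intro n
  induction n with
  | zero => intro _ init; simp
  | succ m ih =>
    intro h init
    have hr : PySem.List.pyRange 0 ((m + 1 : Nat) : Int) 1 =
        PySem.List.pyRange 0 (m : Int) 1 ++ [(m : Int)] := by
      push_cast
      exact PySem.List.pyRange_one_succ_right (by omega)
    rw [hr, List.foldl_append, ih (by omega) init]
    have hm : m < xs.length := by omega
    rw [List.take_add_one, List.foldl_append]
    simp [List.getD, List.getElem?_eq_getElem hm]

-- the same bridge for B's map over range(n)
lemma map_range_take {α β : Type} (xs : List α) (d : α) (g : α → β) :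
    ∀ (n : Nat), n ≤ xs.length →
      (PySem.List.pyRange 0 (n : Int) 1).map (fun j => g (PySem.List.pyGetD xs j d))
        = (xs.take n).map g := by
  intro n
  induction n with
  | zero => simp
  | succ m ih =>
    intro h
    have hr : PySem.List.pyRange 0 ((m + 1 : Nat) : Int) 1 =
        PySem.List.pyRange 0 (m : Int) 1 ++ [(m : Int)] := by
      push_cast
      exact PySem.List.pyRange_one_succ_right (by omega)
    have hm : m < xs.length := by omega
    rw [hr, List.map_append, ih (by omega), List.take_add_one, List.map_append]
    simp [List.getD, List.getElem?_eq_getElem hm]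

-- structural form of str.split('0') on a character list
def splitP : List Char → List Char → List (List Char)
  | [], cur => [cur.reverse]
  | c :: rest, cur => if c = '0' then cur.reverse :: splitP rest [] else splitP rest (c :: cur)

lemma go_eq_splitP :
    ∀ (l : List Char) (fuel : Nat) (cur : List Char) (acc : List (List Char)),
      l.length < fuel →
      PySem.Chars.splitOn.go ['0'] fuel l cur acc = acc.reverse ++ splitP l cur := by
  intro l
  induction l with
  | nil =>
    intro fuel cur acc h
    match fuel with
    | f + 1 => rw [PySem.Chars.splitOn.go.eq_def]; simp [splitP]
  | cons c rest ih =>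
    intro fuel cur acc h
    match fuel with
    | f + 1 =>
      rw [PySem.Chars.splitOn.go.eq_def]
      simp only []
      by_cases hc : c = '0'
      · subst hc
        rw [if_pos (by simp [List.isPrefixOf])]
        rw [show List.drop ['0'].length ('0' :: rest) = rest from rfl]
        rw [ih f [] (cur.reverse :: acc) (by simpa using h)]
        simp [splitP]
      · rw [if_neg (by simp [List.isPrefixOf]; exact fun h => absurd h.symm hc)]
        rw [ih f (c :: cur) acc (by simpa using h)]
        simp [splitP, hc]

lemma splitOn_eq_splitP (l : List Char) :
    PySem.Chars.splitOn l ['0'] = splitP l [] := by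
  rw [PySem.Chars.splitOn, go_eq_splitP l (l.length + 1) [] [] (by omega)]
  simp

-- the bit character of a cell
def bchar (c : Int) : Char := if c = 1 then '1' else '0'

-- lengths of the nonempty split pieces, with a pending block of k ones
def lens (ps : List (List Char)) : List Int :=
  (ps.filter (fun p => p ≠ [])).map (fun p => (p.length : Int))

-- joint characterisation of B's split pipeline by runsR
lemma splitP_runsR (cells : List Int) :
    (∀ k : Nat, 0 < k →
        lens (splitP (cells.map bchar) (List.replicate k '1')) =
          ((k : Int) + ((cells.takeWhile (· == 1)).length : Int))
            :: runsR (cells.drop (cells.takeWhile (· == 1)).length)) ∧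
      lens (splitP (cells.map bchar) []) = runsR cells := by
  induction cells with
  | nil =>
    constructor
    · intro k hk
      simp [splitP, lens, runsR, List.filter, Nat.pos_iff_ne_zero.mp hk, ne_eq, List.replicate_eq_nil_iff]
    · simp [splitP, lens, runsR]
  | cons c rest ih =>
    obtain ⟨ih1, ih2⟩ := ih
    constructor
    · intro k hk
      by_cases hc : c = 1
      · subst hc
        have hb : bchar 1 = '1' := rfl
        simp only [List.map_cons, hb, splitP]
        rw [if_neg (by decide)]
        rw [show ('1' :: List.replicate k '1') = List.replicate (k + 1) '1' from
          (List.replicate_succ ..).symm]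
        rw [ih1 (k + 1) (by omega)]
        simp only [List.takeWhile_cons, beq_self_eq_true, if_true, List.length_cons,
          List.drop_succ_cons]
        congr 1
        push_cast; ring
      · have hb : bchar c = '0' := by simp [bchar, hc]
        simp only [List.map_cons, hb, splitP]
        simp only [if_true]
        have hcur : lens ((List.replicate k '1').reverse :: splitP (rest.map bchar) []) =
            (k : Int) :: lens (splitP (rest.map bchar) []) := by
          simp [lens, List.filter, ne_eq, List.replicate_eq_nil_iff, Nat.pos_iff_ne_zero.mp hk]
        rw [hcur, ih2]
        have htw : (c :: rest).takeWhile (· == (1:Int)) = [] := by simp [hc]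
        rw [htw]
        simp [runsR, hc]
    · by_cases hc : c = 1
      · subst hc
        have hb : bchar 1 = '1' := rfl
        simp only [List.map_cons, hb, splitP]
        rw [if_neg (by decide)]
        rw [show ('1' :: ([] : List Char)) = List.replicate 1 '1' from rfl]
        rw [ih1 1 (by omega), runsR, if_pos rfl]
        congr 1
        push_cast; ring
      · have hb : bchar c = '0' := by simp [bchar, hc]
        simp only [List.map_cons, hb, splitP]
        simp only [if_true]
        have hcur : lens (([] : List Char).reverse :: splitP (rest.map bchar) []) =
            lens (splitP (rest.map bchar) []) := by
          simp [lens, List.filter]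
        rw [hcur, ih2, runsR, if_neg hc]

-- ===== VERDICT (by name: the statement is the Claim_ definition above) =====
theorem tonono_spec : Claim_equal_tonono := by
  intro wej _ hpre
  unfold Spec_tonono
  have hB : tonono_alt wej = wej.map (fun row =>
      lens (PySem.Chars.splitOn
        ((PySem.List.pyRange 0 (((PySem.List.pyGetD wej 0 []).length : Int)) 1).map
          (fun j => if PySem.List.pyGetD row j 0 = 1 then '1' else '0')) ['0'])) := by
    unfold tonono_alt lens
    rw [PySem.List.foldl_append_singleton_eq_map, List.nil_append]
  have h1 : tonono wej = wej.foldl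
      (fun wyj row => wyj ++ [finishA
        ((PySem.List.pyRange 0 (((PySem.List.pyGetD wej 0 []).length : Int)) 1).foldl
          (fun st j => stepA st (PySem.List.pyGetD row j 0)) ([], 0))]) [] :=
    PySem.List.foldl_pyRange_zero_pyGetD' wej ([] : List Int)
      (fun wyj row => wyj ++ [finishA
        ((PySem.List.pyRange 0 (((PySem.List.pyGetD wej 0 []).length : Int)) 1).foldl
          (fun st j => stepA st (PySem.List.pyGetD row j 0)) ([], 0))])
      ([] : List (List Int))
  have hA : tonono wej = wej.map (fun row => finishA
      ((PySem.List.pyRange 0 (((PySem.List.pyGetD wej 0 []).length : Int)) 1).foldl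
        (fun st j => stepA st (PySem.List.pyGetD row j 0)) ([], 0))) := by
    rw [h1, PySem.List.foldl_append_singleton_eq_map, List.nil_append]
  rw [hA, hB]
  apply List.map_congr_left
  intro row hrow
  have hg : PySem.List.pyGetD wej 0 [] = wej.headD [] := by
    cases wej with
    | nil => rfl
    | cons a l => rw [PySem.List.pyGetD_zero]; rfl
  have hnl : (wej.headD []).length ≤ row.length := hpre row hrow
  rw [hg, foldl_range_take row 0 stepA (wej.headD []).length hnl ([], 0)]
  rw [show (fun j => if PySem.List.pyGetD row j 0 = 1 then '1' else '0')
        = (fun j => bchar (PySem.List.pyGetD row j 0)) from by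
      funext j; simp [bchar]]
  rw [map_range_take row 0 bchar (wej.headD []).length hnl, splitOn_eq_splitP]
  rw [(stepA_runsR (row.take (wej.headD []).length)).2,
    (splitP_runsR (row.take (wej.headD []).length)).2]
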